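-- pv_equiv track=rewrite | github.com/fishsauce-05/PythonInPTIT | PY01033.py | solve
-- ===== SOURCE A (Python) =====
-- import math
--
-- def solve(l, r):
-- 	triplets = []
-- 	for i in range(l, r-1):
-- 		for j in range(i+1, r):
-- 			for k in range(j+1, r+1):
-- 				if math.gcd(i, j) == 1 and math.gcd(j, k) == 1 and math.gcd(i, k) == 1:
-- 					triplets.append((i, j, k))
-- 	return triplets
-- ===== SOURCE B (Python) =====
-- import math
--
-- def solve(l, r):
--     # Precompute coprime-neighbor lists: co[a] = ascending b in (a, r] with gcd(a,b)==1.
--     co = {a: [b for b in range(a + 1, r + 1) if math.gcd(a, b) == 1] for a in range(l, r)}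
--     triplets = []
--     for i in range(l, r - 1):
--         si = set(co[i])
--         for j in co[i]:
--             if j < r:
--                 for k in co[j]:
--                     if k in si:
--                         triplets.append((i, j, k))
--     return triplets
-- ===== Notes on version B (the rewrite author's own statement) =====
-- stated objective: alternative
-- what changed: Instead of testing three gcds for every (i,j,k) in a triple range loop, B precomputes a coprime-neighbor dictionary co[a] once (one gcd per pair) and emits triplets by iterating j over co[i] and k over co[j] filtered through set membership in co[i], preserving the lexicographic order.
import Mathlib
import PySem

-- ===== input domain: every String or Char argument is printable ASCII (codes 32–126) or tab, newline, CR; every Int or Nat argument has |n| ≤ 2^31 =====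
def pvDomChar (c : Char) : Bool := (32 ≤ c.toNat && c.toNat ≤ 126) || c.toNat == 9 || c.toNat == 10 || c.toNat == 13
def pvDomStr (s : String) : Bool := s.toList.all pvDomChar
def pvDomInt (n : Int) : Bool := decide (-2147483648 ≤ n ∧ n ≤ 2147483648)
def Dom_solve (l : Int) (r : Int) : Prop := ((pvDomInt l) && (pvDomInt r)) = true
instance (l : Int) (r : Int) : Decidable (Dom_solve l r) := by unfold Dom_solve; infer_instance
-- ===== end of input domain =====

-- B replaces A's triple range loop (three gcd tests per candidate triple) by a precomputed
-- coprime-neighbor dictionary and an intersection-driven traversal (objective: alternative,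
-- fewer gcd calls; same asymptotic cost in the number of candidate triples).

-- ===== PORT A =====
def solve (l : Int) (r : Int) : List (List Int) :=
  (PySem.List.pyRange l (r - 1) 1).foldl (fun acc i =>
    (PySem.List.pyRange (i + 1) r 1).foldl (fun acc2 j =>
      (PySem.List.pyRange (j + 1) (r + 1) 1).foldl (fun acc3 k =>
        if Int.gcd i j == 1 && Int.gcd j k == 1 && Int.gcd i k == 1 then
          acc3 ++ [[i, j, k]]
        else acc3) acc2) acc) []

-- ===== PORT B =====
-- neighbor list: [b for b in range(a+1, r+1) if math.gcd(a, b) == 1]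
def nbrsB (r : Int) (a : Int) : List Int :=
  (PySem.List.pyRange (a + 1) (r + 1) 1).filter (fun b => Int.gcd a b == 1)

-- co = {a: nbrs(a) for a in range(l, r)}
def coB (l : Int) (r : Int) : PySem.Dict Int (List Int) :=
  (PySem.List.pyRange l r 1).foldl (fun d a => d.insert a (nbrsB r a)) PySem.Dict.empty

def solve_alt (l : Int) (r : Int) : List (List Int) :=
  let co := coB l r
  (PySem.List.pyRange l (r - 1) 1).foldl (fun acc i =>
    let si : PySem.Set Int := PySem.Set.ofList (co.getD i [])
    (co.getD i []).foldl (fun acc2 j =>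
      if j < r then
        (co.getD j []).foldl (fun acc3 k =>
          if PySem.Set.contains si k then acc3 ++ [[i, j, k]] else acc3) acc2
      else acc2) acc) []

-- ===== PRECONDITION & SPEC =====
def Spec_solve (l : Int) (r : Int) (out : List (List Int)) : Prop := out = solve_alt l r
instance (l : Int) (r : Int) (out : List (List Int)) : Decidable (Spec_solve l r out) := by unfold Spec_solve; infer_instance

-- ===== CLAIM (what is proved, stated in full; the proofs are below) =====
def Claim_equal_solve : Prop := ∀ (l : Int) (r : Int), Dom_solve l r → Spec_solve l r (solve l r)

-- ===== LEMMAS AND PROOFS =====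

-- the dictionary built by coB maps every a ∈ [l, r) to its neighbor list
theorem coB_getD (l r a : Int) (hla : l ≤ a) (har : a < r) :
    (coB l r).getD a [] = nbrsB r a := by
  unfold coB
  have H : ∀ (xs : List Int) (d : PySem.Dict Int (List Int)),
      (xs.foldl (fun d a => d.insert a (nbrsB r a)) d).getD a []
        = if a ∈ xs then nbrsB r a else d.getD a [] := by
    intro xs
    induction xs with
    | nil => intro d; simp
    | cons x t ih =>
      intro d
      simp only [List.foldl_cons, ih, List.mem_cons]
      by_cases hat : a ∈ t
      · simp [hat]
      · by_cases hax : a = x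
        · subst hax
          simp [hat, PySem.Dict.getD_insert_self]
        · simp [hat, hax, PySem.Dict.getD_insert_of_ne _ _ _ hax]
  rw [H]
  simp [PySem.List.mem_pyRange_one.mpr ⟨hla, har⟩]

-- fixed i: A's middle/inner loops equal B's neighbor-list/intersection loops
theorem middle_eq (l r i : Int) (_hli : l ≤ i) (hir : i < r - 1) (acc : List (List Int)) :
    (PySem.List.pyRange (i + 1) r 1).foldl (fun acc2 j =>
      (PySem.List.pyRange (j + 1) (r + 1) 1).foldl (fun acc3 k =>
        if Int.gcd i j == 1 && Int.gcd j k == 1 && Int.gcd i k == 1 then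
          acc3 ++ [[i, j, k]]
        else acc3) acc2) acc
    = (nbrsB r i).foldl (fun acc2 j =>
        if j < r then
          (nbrsB r j).foldl (fun acc3 k =>
            if PySem.Set.contains (PySem.Set.ofList (nbrsB r i)) k then acc3 ++ [[i, j, k]]
            else acc3) acc2
        else acc2) acc := by
  unfold nbrsB
  rw [← PySem.List.foldl_if_eq_foldl_filter]
  rw [PySem.List.pyRange_one_succ_right (by omega : i + 1 ≤ r), List.foldl_append]
  simp only [List.foldl_cons, List.foldl_nil, lt_irrefl, if_false, ite_self]
  apply PySem.List.foldl_congr_mem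
  intro acc2 j hj
  rw [PySem.List.mem_pyRange_one] at hj
  by_cases hgij : Int.gcd i j == 1
  · simp only [hgij, if_true, hj.2, if_true]
    rw [← PySem.List.foldl_if_eq_foldl_filter]
    apply PySem.List.foldl_congr_mem
    intro acc3 k hk
    rw [PySem.List.mem_pyRange_one] at hk
    have hmem : PySem.Set.contains (PySem.Set.ofList
        ((PySem.List.pyRange (i + 1) r 1 ++ [r]).filter (fun b => Int.gcd i b == 1))) k
        = (Int.gcd i k == 1) := by
      by_cases hik : Int.gcd i k == 1
      · simp [pysem, List.mem_filter, hik]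
        omega
      · simp [pysem, List.mem_filter, hik]
    rw [hmem]
    by_cases hjk : Int.gcd j k == 1 <;> by_cases hik : Int.gcd i k == 1 <;>
      simp [hjk, hik]
  · simp [hgij]

theorem solve_spec' : ∀ (l r : Int), solve l r = solve_alt l r := by
  intro l r
  unfold solve solve_alt
  dsimp only
  apply PySem.List.foldl_congr_mem
  intro acc i hi
  rw [PySem.List.mem_pyRange_one] at hi
  rw [coB_getD l r i hi.1 (by omega)]
  refine Eq.trans (middle_eq l r i hi.1 hi.2 acc) ?_
  apply PySem.List.foldl_congr_mem
  intro acc2 j hj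
  unfold nbrsB at hj
  rw [List.mem_filter, PySem.List.mem_pyRange_one] at hj
  by_cases hjr : j < r
  · simp only [hjr, if_true]
    rw [coB_getD l r j (by omega) hjr]
  · simp [hjr]

-- ===== VERDICT (by name: the statement is the Claim_ definition above) =====
theorem solve_spec : Claim_equal_solve := by
  intro l r _
  unfold Spec_solve
  exact solve_spec' l r
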